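-- pv_equiv track=rewrite | github.com/RafaAyGar/malenia | malenia/results_utils.py | findCliques
-- ===== SOURCE A (Python) =====
-- def findCliques(same):
--     cliques = []
--     prevEndOfClique = 0
--
--     for i in range(len(same)):
--         clique = [i]
--         growClique(same, clique)
--
--         if len(clique) > 1:
--             endOfClique = clique[-1]
--             if endOfClique > prevEndOfClique:
--                 cliques.append(clique)
--                 prevEndOfClique = endOfClique
--
--     finalCliques = [[False]*len(same) for _ in range(len(cliques))]
--     for i in range(len(cliques)):
--         for j in range(len(cliques[i])):
--             finalCliques[i][cliques[i][j]] = True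
--
--     return finalCliques
--
-- def growClique(same, clique):
--     prevVal = clique[-1]
--     if prevVal == len(same)-1:
--         return
--
--     cliqueStart = clique[0]
--     nextVal = prevVal+1
--
--     for col in range(cliqueStart, nextVal):
--         if not same[nextVal][col]:
--             return
--
--     clique.append(nextVal)
--     growClique(same, clique)
-- ===== SOURCE B (Python) =====
-- def findCliques(same):
--     n = len(same)
--     # m[v] = smallest start s such that same[v][col] holds for every col in [s, v)
--     m = [0] * n
--     for v in range(1, n):
--         row = same[v]
--         s = v
--         while s > 0 and row[s - 1]:
--             s -= 1
--         m[v] = s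
--     out = []
--     prevEnd = 0
--     for i in range(n):
--         e = i
--         while e + 1 < n and m[e + 1] <= i:
--             e += 1
--         if e > i and e > prevEnd:
--             out.append([i <= v <= e for v in range(n)])
--             prevEnd = e
--     return out
-- ===== Notes on version B (the rewrite author's own statement) =====
-- stated objective: alternative
-- what changed: Instead of re-growing each clique by recursively re-checking whole column ranges, B precomputes per row v the smallest consistent start m[v] (start of the trailing run of True before v) in one pass, then extends each start i while m[e+1] <= i, emitting the boolean mask directly.
import Mathlib
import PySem

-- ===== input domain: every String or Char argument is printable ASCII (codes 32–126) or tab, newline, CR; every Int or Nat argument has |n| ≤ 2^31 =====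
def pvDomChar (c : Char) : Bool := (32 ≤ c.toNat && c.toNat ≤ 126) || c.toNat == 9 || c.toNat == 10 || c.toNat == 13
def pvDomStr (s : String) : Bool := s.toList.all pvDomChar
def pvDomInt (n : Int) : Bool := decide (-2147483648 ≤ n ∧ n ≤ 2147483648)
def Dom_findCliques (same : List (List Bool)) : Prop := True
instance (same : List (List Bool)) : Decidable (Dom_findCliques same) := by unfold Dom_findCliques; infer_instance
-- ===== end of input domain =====

-- B replaces A's per-start recursive re-checking of whole column ranges by a precomputed
-- per-row minimal consistent start m[v], then extends each start by a single scan (objective: alternative algorithm).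

-- ===== PORT A =====
-- growClique(same, clique): the recursion is bounded by len(same) steps (the last element
-- strictly increases towards len(same)-1); 'fuel' is only a totality guard for that recursion.
-- same[nextVal][col] is ported with pyGetD (exact on Pre_, where all indices are in range).
def growCliqueA (same : List (List Bool)) : Nat → List Int → List Int
  | 0, clique => clique
  | fuel+1, clique =>
    let prevVal := PySem.List.pyGetD clique (-1) 0
    if prevVal = (same.length : Int) - 1 then clique
    else
      let cliqueStart := PySem.List.pyGetD clique 0 0
      let nextVal := prevVal + 1
      if (PySem.List.pyRange cliqueStart nextVal 1).all
          (fun col => PySem.List.pyGetD (PySem.List.pyGetD same nextVal []) col false) then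
        growCliqueA same fuel (clique ++ [nextVal])
      else clique

def findCliques (same : List (List Bool)) : List (List Bool) :=
  let n := same.length
  let st := (List.range n).foldl (fun (st : List (List Int) × Int) (i : Nat) =>
    let clique := growCliqueA same n [(i : Int)]
    if clique.length > 1 then
      let endOfClique := PySem.List.pyGetD clique (-1) 0
      if endOfClique > st.2 then (st.1 ++ [clique], endOfClique) else st
    else st) ([], 0)
  -- the final double loop: each clique row starts as [False]*n and its members (all in [0,n)) are set True
  st.1.map (fun c => c.foldl (fun mask v => PySem.List.pySetD mask v true) (List.replicate n false))

-- ===== PORT B =====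
-- while s > 0 and row[s-1]: s -= 1   (structural recursion on s; row[s-1] via pyGetD, in range on Pre_)
def trailStart (row : List Bool) : Nat → Nat
  | 0 => 0
  | s+1 => if PySem.List.pyGetD row (s : Int) false then trailStart row s else s+1

-- while e + 1 < n and m[e+1] <= i: e += 1
def extendEnd (m : List Nat) (n i e : Nat) : Nat :=
  if _ : e + 1 < n ∧ m.getD (e+1) 0 ≤ i then extendEnd m n i (e+1) else e
termination_by n - e

def findCliques_alt (same : List (List Bool)) : List (List Bool) :=
  let n := same.length
  -- m = [0]*n; for v in range(1, n): m[v] = trailing-run start of row v before index v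
  let m : List Nat := (List.range n).map (fun v => if v = 0 then 0 else trailStart (same.getD v []) v)
  ((List.range n).foldl (fun (st : List (List Bool) × Nat) i =>
    let e := extendEnd m n i i
    if e > i ∧ e > st.2 then
      (st.1 ++ [(List.range n).map (fun v => decide (i ≤ v) && decide (v ≤ e))], e)
    else st) ([], 0)).1

-- ===== PRECONDITION & SPEC =====
-- A indexes same[v][v-1] (and lower columns) for every v ≥ 1 it reaches, so every row v
-- shorter than v makes A raise IndexError; Pre_ admits exactly the inputs where A returns.
def Pre_findCliques (same : List (List Bool)) : Prop :=
  ∀ v < same.length, v ≤ (same.getD v []).length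
instance (same : List (List Bool)) : Decidable (Pre_findCliques same) := by
  unfold Pre_findCliques; infer_instance
def pvWitness_findCliques : List (List Bool) := [[true, true], [true, true]]
def Spec_findCliques (same : List (List Bool)) (out : List (List Bool)) : Prop := out = findCliques_alt same
instance (same : List (List Bool)) (out : List (List Bool)) : Decidable (Spec_findCliques same out) := by unfold Spec_findCliques; infer_instance

-- ===== CLAIM (what is proved, stated in full; the proofs are below) =====
def Claim_equal_findCliques : Prop := ∀ (same : List (List Bool)), Dom_findCliques same → Pre_findCliques same → Spec_findCliques same (findCliques same)

-- ===== LEMMAS AND PROOFS =====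

-- the contiguous clique [i, i+1, …, p] as a list of Ints
def seg (i p : Nat) : List Int := (List.range' i (p+1-i)).map (fun k => (k : Int))

theorem seg_self (i : Nat) : seg i i = [(i : Int)] := by
  simp [seg]

theorem seg_concat (i p : Nat) (h : i ≤ p) :
    seg i (p+1) = seg i p ++ [((p+1 : Nat) : Int)] := by
  unfold seg
  have h1 : p + 1 + 1 - i = (p + 1 - i) + 1 := by omega
  rw [h1, List.range'_1_concat]
  simp
  omega

theorem seg_head (i p : Nat) (h : i ≤ p) :
    PySem.List.pyGetD (seg i p) 0 0 = (i : Int) := by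
  unfold seg
  have h1 : p + 1 - i = (p - i) + 1 := by omega
  rw [h1, List.range'_succ]
  simp [PySem.List.pyGetD_zero_cons]

theorem seg_last (i p : Nat) (h : i ≤ p) :
    PySem.List.pyGetD (seg i p) (-1) 0 = (p : Int) := by
  rcases Nat.eq_or_lt_of_le h with rfl | hlt
  · rw [seg_self]
    exact PySem.List.pyGetD_neg_one_append_singleton [] _ _
  · have hp : p - 1 + 1 = p := by omega
    rw [← hp, seg_concat i (p-1) (by omega), PySem.List.pyGetD_neg_one_append_singleton]

theorem seg_length (i p : Nat) : (seg i p).length = p + 1 - i := by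
  simp [seg]

-- trailStart row v ≤ s  ↔  row has True at every column in [s, v)
theorem trailStart_le_self (row : List Bool) (v : Nat) : trailStart row v ≤ v := by
  induction v with
  | zero => simp [trailStart]
  | succ v ih => unfold trailStart; split <;> omega

theorem trailStart_le_iff (row : List Bool) (v s : Nat) (hs : s ≤ v) :
    trailStart row v ≤ s ↔ ∀ c, s ≤ c → c < v → row.getD c false = true := by
  induction v with
  | zero => simp [trailStart]
  | succ v ih =>
    unfold trailStart
    by_cases hrv : PySem.List.pyGetD row (v : Int) false = true
    · rw [if_pos hrv]
      have hrv' : row.getD v false = true := by simpa using hrv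
      rcases Nat.eq_or_lt_of_le hs with rfl | hlt
      · constructor
        · intro _ c h1 h2; omega
        · intro _; exact le_trans (trailStart_le_self row v) (by omega)
      · rw [ih (by omega)]
        constructor
        · intro h c h1 h2
          rcases Nat.lt_or_ge c v with h3 | h3
          · exact h c h1 h3
          · have : c = v := by omega
            subst this; exact hrv'
        · intro h c h1 h2; exact h c h1 (by omega)
    · rw [if_neg hrv]
      have hrv' : ¬ row.getD v false = true := by simpa using hrv
      constructor
      · intro h c h1 h2; omega
      · intro h
        rcases Nat.eq_or_lt_of_le hs with rfl | hlt
        · omega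
        · exact absurd (h v (by omega) (by omega)) hrv'

-- A's column check for extending a clique [i..p] by p+1 equals "every column in [i, p+1) is True"
theorem all_cols_iff (row : List Bool) (i v : Nat) :
    ((PySem.List.pyRange (i : Int) (v : Int) 1).all
      (fun col => PySem.List.pyGetD row col false)) = true
    ↔ ∀ c, i ≤ c → c < v → row.getD c false = true := by
  rw [List.all_eq_true]
  constructor
  · intro h c h1 h2
    have := h (c : Int) (by rw [PySem.List.mem_pyRange_one]; constructor <;> omega)
    simpa using this
  · intro h x hx
    rw [PySem.List.mem_pyRange_one] at hx
    have hx0 : 0 ≤ x := by omega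
    have hxe : x = ((x.toNat : Nat) : Int) := by omega
    rw [hxe, PySem.List.pyGetD_natCast]
    have : row.getD x.toNat false = true := h x.toNat (by omega) (by omega)
    simpa using this

-- the m-list entry
theorem m_get (same : List (List Bool)) (v : Nat) (hv : v < same.length) :
    (((List.range same.length).map
        (fun v => if v = 0 then 0 else trailStart (same.getD v []) v)).getD v 0)
    = trailStart (same.getD v []) v := by
  rw [List.getD_eq_getElem?_getD, List.getElem?_map, List.getElem?_range hv]
  rcases Nat.eq_zero_or_pos v with rfl | hpos
  · simp [trailStart]
  · simp [Nat.pos_iff_ne_zero.mp hpos]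

theorem extendEnd_ge (m : List Nat) (n i e : Nat) : e ≤ extendEnd m n i e := by
  fun_induction extendEnd <;> omega

theorem extendEnd_lt (m : List Nat) (n i e : Nat) (h : e < n) : extendEnd m n i e < n := by
  fun_induction extendEnd with
  | case1 e hc ih => exact ih hc.1
  | case2 => exact h

-- core: growing A's clique [i..p] reaches exactly B's end
theorem grow_eq (same : List (List Bool)) (M : List Nat)
    (hMdef : M = (List.range same.length).map
        (fun v => if v = 0 then 0 else trailStart (same.getD v []) v))
    (fuel i p : Nat)
    (hip : i ≤ p) (hpn : p < same.length) (hfuel : same.length - p ≤ fuel) :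
    growCliqueA same fuel (seg i p) = seg i (extendEnd M same.length i p) := by
  induction fuel generalizing p with
  | zero => omega
  | succ fuel ih =>
    rw [growCliqueA]
    simp only [seg_last i p hip, seg_head i p hip]
    by_cases hp : (p : Int) = (same.length : Int) - 1
    · rw [if_pos hp]
      rw [extendEnd, dif_neg (by rintro ⟨h, -⟩; omega)]
    · rw [if_neg hp]
      have hp1 : p + 1 < same.length := by omega
      have hmg : M.getD (p+1) 0 = trailStart (same.getD (p+1) []) (p+1) := by
        rw [hMdef]; exact m_get same (p+1) hp1
      have hcast : (p : Int) + 1 = ((p + 1 : Nat) : Int) := by push_cast; ring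
      rw [hcast, PySem.List.pyGetD_natCast]
      by_cases hc : trailStart (same.getD (p+1) []) (p+1) ≤ i
      · have hall : ((PySem.List.pyRange (i : Int) ((p+1 : Nat) : Int) 1).all
            (fun col => PySem.List.pyGetD (same.getD (p+1) []) col false)) = true := by
          rw [all_cols_iff]
          exact (trailStart_le_iff _ _ _ (by omega)).mp hc
        have hstep : extendEnd M same.length i p = extendEnd M same.length i (p+1) := by
          rw [extendEnd, dif_pos ⟨hp1, by rw [hmg]; exact hc⟩]
        rw [hstep, if_pos hall, ← seg_concat i p hip]
        exact ih (p+1) (by omega) hp1 (by omega)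
      · have hall : ¬ ((PySem.List.pyRange (i : Int) ((p+1 : Nat) : Int) 1).all
            (fun col => PySem.List.pyGetD (same.getD (p+1) []) col false)) = true := by
          rw [all_cols_iff]
          intro hforall
          exact hc ((trailStart_le_iff _ _ _ (by omega)).mpr hforall)
        have hstop : extendEnd M same.length i p = p := by
          rw [extendEnd, dif_neg (by rintro ⟨-, h2⟩; rw [hmg] at h2; omega)]
        rw [hstop, if_neg hall]

-- mask building: A's foldl-set over [i..e] equals B's direct comprehension
theorem mask_eq (n i e : Nat) (hie : i ≤ e) (hen : e < n) :
    (seg i e).foldl (fun mask v => PySem.List.pySetD mask v true) (List.replicate n false)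
      = (List.range n).map (fun v => decide (i ≤ v) && decide (v ≤ e)) := by
  induction e, hie using Nat.le_induction with
  | base =>
    rw [seg_self]
    apply List.ext_getElem
    · simp
    · intro j hj1 hj2
      simp only [List.foldl_cons, List.foldl_nil, PySem.List.pySetD_natCast,
        List.getElem_map, List.getElem_range]
      rw [List.getElem_set]
      by_cases hji : i = j
      · subst hji; simp
      · simp only [if_neg hji, List.getElem_replicate]
        have hlen : j < n := by simpa using hj1
        simp only [List.length_set, List.length_replicate] at *
        have : ¬ (i ≤ j ∧ j ≤ i) := by omega
        by_cases h1 : i ≤ j <;> by_cases h2 : j ≤ i <;> simp [h1, h2] <;> omega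
  | succ e he ih =>
    have hen' : e < n := by omega
    rw [seg_concat i e he, List.foldl_append, ih hen']
    apply List.ext_getElem
    · simp
    · intro j hj1 hj2
      simp only [List.foldl_cons, List.foldl_nil, PySem.List.pySetD_natCast,
        List.getElem_map, List.getElem_range]
      rw [List.getElem_set]
      have hjn : j < n := by simpa using hj2
      by_cases hje : e + 1 = j
      · subst hje; simp; omega
      · simp only [if_neg hje, List.getElem_map, List.getElem_range]
        by_cases h1 : i ≤ j <;> by_cases h2 : j ≤ e <;> by_cases h3 : j ≤ e + 1 <;>
          simp [h1, h2, h3] <;> omega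

-- the two folds over range n stay in lockstep
theorem fold_rel (same : List (List Bool)) (l : List Nat) (hl : ∀ x ∈ l, x < same.length)
    (cl : List (List Int)) (pn : Nat) :
    ((l.foldl (fun (st : List (List Int) × Int) (i : Nat) =>
        let clique := growCliqueA same same.length [(i : Int)]
        if clique.length > 1 then
          let endOfClique := PySem.List.pyGetD clique (-1) 0
          if endOfClique > st.2 then (st.1 ++ [clique], endOfClique) else st
        else st) (cl, (pn : Int))).1).map
          (fun c => c.foldl (fun mask v => PySem.List.pySetD mask v true)
            (List.replicate same.length false))
    = (l.foldl (fun (st : List (List Bool) × Nat) (i : Nat) =>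
        let e := extendEnd ((List.range same.length).map
            (fun v => if v = 0 then 0 else trailStart (same.getD v []) v)) same.length i i
        if e > i ∧ e > st.2 then
          (st.1 ++ [(List.range same.length).map (fun v => decide (i ≤ v) && decide (v ≤ e))], e)
        else st)
        (cl.map (fun c => c.foldl (fun mask v => PySem.List.pySetD mask v true)
            (List.replicate same.length false)), pn)).1 := by
  induction l generalizing cl pn with
  | nil => simp
  | cons i l ihl =>
    have hi : i < same.length := hl i (List.mem_cons_self)
    simp only [List.foldl_cons]
    have hgrow : growCliqueA same same.length [(i : Int)]
        = seg i (extendEnd ((List.range same.length).map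
            (fun v => if v = 0 then 0 else trailStart (same.getD v []) v)) same.length i i) := by
      rw [← seg_self]
      exact grow_eq same _ rfl same.length i i le_rfl hi (by omega)
    set M := (List.range same.length).map
        (fun v => if v = 0 then 0 else trailStart (same.getD v []) v) with hM
    set e := extendEnd M same.length i i with he
    have hie : i ≤ e := extendEnd_ge M same.length i i
    have hen : e < same.length := extendEnd_lt M same.length i i hi
    have hlen : (seg i e).length = e + 1 - i := seg_length i e
    have hlast : PySem.List.pyGetD (seg i e) (-1) 0 = (e : Int) := seg_last i e hie
    simp only [hgrow, hlen, hlast]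
    by_cases h1 : e > i
    · by_cases h2 : e > pn
      · rw [if_pos (by omega), if_pos (by exact_mod_cast h2), if_pos ⟨h1, h2⟩]
        have := ihl (fun x hx => hl x (List.mem_cons_of_mem _ hx)) (cl ++ [seg i e]) e
        rw [List.map_append] at this
        simpa [mask_eq same.length i e hie hen] using this
      · rw [if_pos (by omega), if_neg (by exact_mod_cast h2), if_neg (by tauto)]
        exact ihl (fun x hx => hl x (List.mem_cons_of_mem _ hx)) cl pn
    · rw [if_neg (by omega), if_neg (by tauto)]
      exact ihl (fun x hx => hl x (List.mem_cons_of_mem _ hx)) cl pn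

-- ===== VERDICT (by name: the statement is the Claim_ definition above) =====
theorem findCliques_spec : Claim_equal_findCliques := by
  intro same _ _
  unfold Spec_findCliques findCliques findCliques_alt
  have := fold_rel same (List.range same.length)
    (fun x hx => List.mem_range.mp hx) [] 0
  exact this
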